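-- pv_equiv track=rewrite | github.com/Pradhansumit/Coding-Problems | Leetcode/2598/2598.py | findSmallestInteger
-- ===== SOURCE A (Python) =====
-- from collections import defaultdict
-- from typing import List
--
-- def findSmallestInteger(nums: List[int], value: int) -> int:
--     ans: int = 0
--     mapp = defaultdict(int)
--
--     for i in nums:
--         r = (i % value + value) % value
--         mapp[r] = mapp.get(r, 0) + 1
--
--     while True:
--         r = ans % value
--         if mapp[r] > 0:
--             mapp[r] -= 1
--             ans += 1
--         else:
--             return ans
-- ===== SOURCE B (Python) =====
-- def findSmallestInteger(nums, value):
--     cnt = {}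
--     for i in nums:
--         r = i % value
--         cnt[r] = cnt.get(r, 0) + 1
--     # beyond len(nums)+1 remainders, one with count 0 has already been seen,
--     # so the lexicographic minimum over range(value) is attained in this prefix
--     bound = min(value, len(nums) + 1)
--     mn, r_min = min((cnt.get(r, 0), r) for r in range(bound))
--     return mn * value + r_min
-- ===== Notes on version B (the rewrite author's own statement) =====
-- stated objective: simpler
-- what changed: The step-by-step while-loop that consumes one counter per candidate answer is replaced by a closed form: scan remainders r over range(min(value, len(nums)+1)) once (beyond that prefix a count-0 remainder has already appeared), take the smallest count (absent = 0) with the smallest remainder as tie-break, and return min_count*value + that remainder.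
-- outside the precondition, e.g. on findSmallestInteger([1], -2): A returns 0, B raises ValueError; on findSmallestInteger([], 0): A raises ZeroDivisionError, B raises ValueError
import Mathlib
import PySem

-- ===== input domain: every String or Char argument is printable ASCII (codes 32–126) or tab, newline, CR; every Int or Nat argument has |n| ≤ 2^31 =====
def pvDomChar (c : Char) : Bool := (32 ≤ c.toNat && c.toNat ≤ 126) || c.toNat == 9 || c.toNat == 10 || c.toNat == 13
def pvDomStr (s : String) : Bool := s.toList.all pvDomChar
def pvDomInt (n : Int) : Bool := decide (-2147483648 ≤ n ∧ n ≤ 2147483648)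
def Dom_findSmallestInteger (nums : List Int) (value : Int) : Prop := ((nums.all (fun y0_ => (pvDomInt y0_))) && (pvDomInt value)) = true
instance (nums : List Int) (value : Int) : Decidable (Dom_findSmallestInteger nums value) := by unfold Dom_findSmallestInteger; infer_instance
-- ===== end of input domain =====

-- B replaces A's step-by-step while-loop by a closed form over the remainder counts (objective: simpler).

-- ===== PORT A =====
-- the while-loop of A; fuel (nums.length + 1) only makes the recursion total — it never runs out when 0 < value
def pvLoopA (value : Int) : Nat → Int → PySem.Dict Int Int → Int
  | 0, ans, _ => ans
  | fuel + 1, ans, mapp =>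
      let r := PySem.Int.mod ans value
      if mapp.getD r 0 > 0 then
        pvLoopA value fuel (ans + 1) (mapp.insert r (mapp.getD r 0 - 1))
      else ans

def findSmallestInteger (nums : List Int) (value : Int) : Int :=
  let mapp := nums.foldl
    (fun d i =>
      let r := PySem.Int.mod (PySem.Int.mod i value + value) value
      d.insert r (d.getD r 0 + 1))
    PySem.Dict.empty
  pvLoopA value (nums.length + 1) 0 mapp

-- ===== PORT B =====
def findSmallestInteger_alt (nums : List Int) (value : Int) : Int :=
  let cnt := nums.foldl
    (fun d i =>
      let r := PySem.Int.mod i value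
      d.insert r (d.getD r 0 + 1))
    PySem.Dict.empty
  -- beyond nums.length + 1 remainders one with count 0 has already been seen, so the
  -- lexicographic minimum over range(value) is attained within range(bound)
  match (PySem.List.pyRange 0 (min value ((nums.length : Int) + 1)) 1).map (fun r => (cnt.getD r 0, r)) with
  | [] => 0   -- unreachable when 0 < value (Python's min raises ValueError on an empty range)
  | p :: ps =>
      let m := ps.foldl (fun best q =>
        if q.1 < best.1 ∨ (q.1 = best.1 ∧ q.2 < best.2) then q else best) p
      m.1 * value + m.2

-- ===== PRECONDITION & SPEC =====
-- Pre_ excludes value ≤ 0: at value = 0 A raises ZeroDivisionError; for value < 0 A's return value is an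
-- accident of Python's negative-divisor remainders and B's min over the empty range(value) raises ValueError.
def Pre_findSmallestInteger (nums : List Int) (value : Int) : Prop := 0 < value
instance (nums : List Int) (value : Int) : Decidable (Pre_findSmallestInteger nums value) := by unfold Pre_findSmallestInteger; infer_instance
def pvWitness_findSmallestInteger : List Int × Int := ([1, -2, 3, 3], 2)
def Spec_findSmallestInteger (nums : List Int) (value : Int) (out : Int) : Prop := out = findSmallestInteger_alt nums value
instance (nums : List Int) (value : Int) (out : Int) : Decidable (Spec_findSmallestInteger nums value out) := by unfold Spec_findSmallestInteger; infer_instance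

-- ===== CLAIM (what is proved, stated in full; the proofs are below) =====
def Claim_equal_findSmallestInteger : Prop := ∀ (nums : List Int) (value : Int), Dom_findSmallestInteger nums value → Pre_findSmallestInteger nums value → Spec_findSmallestInteger nums value (findSmallestInteger nums value)

-- ===== LEMMAS AND PROOFS =====

-- lexicographic ≤ on (count, remainder) pairs, as Python's tuple min uses
def pvLexLe (a b : Int × Int) : Prop := a.1 < b.1 ∨ (a.1 = b.1 ∧ a.2 ≤ b.2)

theorem pvLexLe_refl (a : Int × Int) : pvLexLe a a := by unfold pvLexLe; omega

theorem pvLexLe_trans {a b c : Int × Int} (h1 : pvLexLe a b) (h2 : pvLexLe b c) : pvLexLe a c := by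
  unfold pvLexLe at *; omega

-- the fold in B computes a lex-minimum of p :: ps
theorem pvFoldMin_spec (ps : List (Int × Int)) (p : Int × Int) :
    (ps.foldl (fun best q => if q.1 < best.1 ∨ (q.1 = best.1 ∧ q.2 < best.2) then q else best) p) ∈ p :: ps ∧
    ∀ q ∈ p :: ps, pvLexLe (ps.foldl (fun best q => if q.1 < best.1 ∨ (q.1 = best.1 ∧ q.2 < best.2) then q else best) p) q := by
  induction ps generalizing p with
  | nil => exact ⟨List.mem_singleton.mpr rfl, by intro q hq; simp at hq; subst hq; exact pvLexLe_refl _⟩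
  | cons x xs ih =>
      simp only [List.foldl_cons]
      by_cases hc : x.1 < p.1 ∨ (x.1 = p.1 ∧ x.2 < p.2)
      · rw [if_pos hc]
        obtain ⟨hmem, hle⟩ := ih x
        refine ⟨?_, ?_⟩
        · rcases List.mem_cons.mp hmem with h | h
          · simp [h]
          · simp [h]
        · intro q hq
          rcases List.mem_cons.mp hq with rfl | hq
          · exact pvLexLe_trans (hle _ List.mem_cons_self) (by unfold pvLexLe; omega)
          rcases List.mem_cons.mp hq with rfl | hq
          · exact hle _ List.mem_cons_self
          · exact hle _ (List.mem_cons_of_mem _ hq)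
      · rw [if_neg hc]
        obtain ⟨hmem, hle⟩ := ih p
        refine ⟨?_, ?_⟩
        · rcases List.mem_cons.mp hmem with h | h
          · simp [h]
          · simp [h]
        · intro q hq
          rcases List.mem_cons.mp hq with rfl | hq
          · exact hle _ List.mem_cons_self
          rcases List.mem_cons.mp hq with rfl | hq
          · exact pvLexLe_trans (hle _ List.mem_cons_self) (by unfold pvLexLe; omega)
          · exact hle _ (List.mem_cons_of_mem _ hq)

-- counting: the dicts built by both ports store the residue counts
theorem pvCountA (nums : List Int) (value : Int) (hv : 0 < value) (r : Int) :
    (nums.foldl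
      (fun d i =>
        d.insert (PySem.Int.mod (PySem.Int.mod i value + value) value)
          (d.getD (PySem.Int.mod (PySem.Int.mod i value + value) value) 0 + 1))
      PySem.Dict.empty).getD r 0 = ((nums.map (fun i => i % value)).count r : Int) := by
  have hkey : ∀ i : Int, PySem.Int.mod (PySem.Int.mod i value + value) value = i % value := by
    intro i
    rw [PySem.Int.mod_eq_emod_of_pos hv, PySem.Int.mod_eq_emod_of_pos hv,
      Int.add_emod_right, Int.emod_emod_of_dvd _ dvd_rfl]
  simp only [hkey]
  rw [← List.foldl_map (f := fun i : Int => i % value)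
    (g := fun (d : PySem.Dict Int Int) x => d.insert x (d.getD x 0 + 1))]
  rw [PySem.Dict.getD_foldl_insert_add_one]
  simp

theorem pvCountB (nums : List Int) (value : Int) (hv : 0 < value) (r : Int) :
    (nums.foldl
      (fun d i =>
        d.insert (PySem.Int.mod i value) (d.getD (PySem.Int.mod i value) 0 + 1))
      PySem.Dict.empty).getD r 0 = ((nums.map (fun i => i % value)).count r : Int) := by
  have hkey : ∀ i : Int, PySem.Int.mod i value = i % value := fun i =>
    PySem.Int.mod_eq_emod_of_pos hv
  simp only [hkey]
  rw [← List.foldl_map (f := fun i : Int => i % value)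
    (g := fun (d : PySem.Dict Int Int) x => d.insert x (d.getD x 0 + 1))]
  rw [PySem.Dict.getD_foldl_insert_add_one]
  simp

-- N ans t r: how many u with ans ≤ u < t have u % value = r
def pvN (value ans t r : Int) : Nat :=
  ((List.range (t - ans).toNat).map (fun k : Nat => (ans + (k : Int)) % value)).count r

theorem pvN_succ (value ans t r : Int) (h : ans < t) :
    pvN value ans t r = pvN value (ans + 1) t r + (if ans % value = r then 1 else 0) := by
  unfold pvN
  have hn : (t - ans).toNat = (t - (ans + 1)).toNat + 1 := by omega
  rw [hn, List.range_succ_eq_map, List.map_cons, List.map_map, List.count_cons]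
  have hmap : ((List.range ((t - (ans + 1)).toNat)).map ((fun k : Nat => (ans + (k : Int)) % value) ∘ Nat.succ))
      = (List.range ((t - (ans + 1)).toNat)).map (fun k : Nat => ((ans + 1) + (k : Int)) % value) := by
    apply List.map_congr_left
    intro k _
    simp only [Function.comp]
    congr 1
    push_cast
    ring
  rw [hmap]
  rcases eq_or_ne (ans % value) r with he | he <;> simp [he]

theorem pvN_formula (value : Int) (hv : 0 < value) (n : Nat) (s : Int) (hs0 : 0 ≤ s) (hs : s < value) :
    (pvN value 0 (n : Int) s : Int) = (n : Int) / value + (if s < (n : Int) % value then 1 else 0) := by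
  induction n with
  | zero =>
      simp [pvN]
      omega
  | succ n ih =>
      have hstep : pvN value 0 ((n : Int) + 1) s
          = pvN value 0 (n : Int) s + (if ((n : Int)) % value = s then 1 else 0) := by
        unfold pvN
        have h1 : (((n : Int) + 1) - 0).toNat = ((n : Int) - 0).toNat + 1 := by omega
        rw [h1, List.range_succ, List.map_append, List.count_append]
        have h2 : ((n : Int) - 0).toNat = n := by omega
        rcases eq_or_ne ((n : Int) % value) s with he | he <;> simp [he]
      have hq := Int.ediv_add_emod (n : Int) value
      have hr0 : 0 ≤ (n : Int) % value := Int.emod_nonneg _ (by omega)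
      have hrv : (n : Int) % value < value := Int.emod_lt_of_pos _ hv
      push_cast
      push_cast at ih
      rw [hstep]
      push_cast
      rw [ih]
      -- compute (n+1) / value and (n+1) % value
      by_cases hcase : (n : Int) % value + 1 = value
      · have hdiv : ((n : Int) + 1) / value = (n : Int) / value + 1 := by
          have : ((n : Int) + 1) = value * ((n : Int) / value + 1) := by ring_nf; omega
          rw [this, Int.mul_ediv_cancel_left _ (by omega)]
        have hmod : ((n : Int) + 1) % value = 0 := by
          have : ((n : Int) + 1) = value * ((n : Int) / value + 1) := by ring_nf; omega
          rw [this, Int.mul_emod_right]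
        rw [hdiv, hmod]
        split <;> split <;> omega
      · have hrep : (n : Int) + 1 = ((n : Int) % value + 1) + value * ((n : Int) / value) := by omega
        have hdiv : ((n : Int) + 1) / value = (n : Int) / value := by
          rw [hrep, Int.add_mul_ediv_left _ _ (by omega : value ≠ 0),
            Int.ediv_eq_zero_of_lt (by omega) (by omega), zero_add]
        have hmod : ((n : Int) + 1) % value = (n : Int) % value + 1 := by
          rw [hrep, Int.add_mul_emod_self_left, Int.emod_eq_of_lt (by omega) (by omega)]
        rw [hdiv, hmod]
        split <;> split <;> omega

-- the loop of A returns the first t at which the (consumed) count runs out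
theorem pvLoopA_eq (value : Int) (hv : 0 < value) :
    ∀ (fuel : Nat) (ans t : Int) (d : PySem.Dict Int Int),
      ans ≤ t →
      (t - ans).toNat < fuel →
      (∀ u, ans ≤ u → u < t → ((pvN value ans u (u % value) : Int) < d.getD (u % value) 0)) →
      (d.getD (t % value) 0 ≤ (pvN value ans t (t % value) : Int)) →
      pvLoopA value fuel ans d = t := by
  intro fuel
  induction fuel with
  | zero => intro ans t d h1 h2 h3 h4; omega
  | succ n ih =>
      intro ans t d h1 h2 h3 h4
      have hmod : PySem.Int.mod ans value = ans % value := PySem.Int.mod_eq_emod_of_pos hv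
      rcases eq_or_lt_of_le h1 with rfl | hlt
      · have hN : pvN value ans ans (ans % value) = 0 := by
          unfold pvN; simp
        rw [hN] at h4
        simp only [pvLoopA, hmod]
        rw [if_neg (by push_cast at h4; omega)]
      · have hpos : (0 : Int) < d.getD (ans % value) 0 := by
          have := h3 ans le_rfl hlt
          have hN : pvN value ans ans (ans % value) = 0 := by unfold pvN; simp
          rw [hN] at this
          push_cast at this; omega
        simp only [pvLoopA, hmod]
        rw [if_pos hpos]
        apply ih
        · omega
        · omega
        · intro u hu1 hu2
          have h := h3 u (by omega) hu2
          rw [pvN_succ value ans u (u % value) (by omega)] at h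
          rw [PySem.Dict.getD_insert]
          by_cases hc : u % value = ans % value
          · rw [if_pos hc]
            rw [hc, if_pos rfl] at h
            rw [hc]
            push_cast at h ⊢
            omega
          · rw [if_neg hc]
            rw [if_neg (by omega : ¬ ans % value = u % value)] at h
            push_cast at h ⊢
            omega
        · have h := h4
          rw [pvN_succ value ans t (t % value) (by omega)] at h
          rw [PySem.Dict.getD_insert]
          by_cases hc : t % value = ans % value
          · rw [if_pos hc]
            rw [hc, if_pos rfl] at h
            rw [hc] at h4 ⊢
            push_cast at h ⊢
            omega
          · rw [if_neg hc]
            rw [if_neg (by omega : ¬ ans % value = t % value)] at h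
            push_cast at h ⊢
            omega

theorem pvSumInd (n k : Nat) (h : k ≤ n) :
    ∑ r ∈ Finset.range n, (if r < k then (1:Int) else 0) = (k : Int) := by
  have hsub : ∑ r ∈ Finset.range n, (if r < k then (1:Int) else 0)
      = ∑ r ∈ Finset.range k, (if r < k then (1:Int) else 0) := by
    symm
    apply Finset.sum_subset (by intro a ha; simp only [Finset.mem_range] at *; omega)
    intro r _ hr
    simp only [Finset.mem_range] at hr
    rw [if_neg (by omega)]
  rw [hsub]
  have : ∀ r ∈ Finset.range k, (if r < k then (1:Int) else 0) = 1 := by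
    intro r hr; simp only [Finset.mem_range] at hr; rw [if_pos hr]
  rw [Finset.sum_congr rfl this, Finset.sum_const, Finset.card_range]
  simp

theorem pvSumLen (value : Int) (hv : 0 < value) :
    ∀ l : List Int, (∀ x ∈ l, 0 ≤ x ∧ x < value) →
      ∑ r ∈ Finset.range value.toNat, ((l.count ((r : Nat) : Int)) : Int) = (l.length : Int) := by
  intro l
  induction l with
  | nil => simp
  | cons x t ih =>
      intro hmem
      have hx := hmem x List.mem_cons_self
      have hind : ∑ r ∈ Finset.range value.toNat, (if (x == ((r : Nat) : Int)) = true then (1:Int) else 0) = 1 := by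
        rw [Finset.sum_eq_single_of_mem x.toNat (Finset.mem_range.mpr (by omega))]
        · rw [if_pos (by simp; omega)]
        · intro b _ hb
          rw [if_neg (by simp; omega)]
      have : ∀ r ∈ Finset.range value.toNat,
          (((x :: t).count ((r : Nat) : Int) : Int)) = (t.count ((r : Nat) : Int) : Int) + (if (x == ((r : Nat) : Int)) = true then (1:Int) else 0) := by
        intro r _
        rw [List.count_cons]
        push_cast
        split <;> ring
      rw [Finset.sum_congr rfl this, Finset.sum_add_distrib, ih (fun y hy => hmem y (List.mem_cons_of_mem _ hy)), hind]
      push_cast [List.length_cons]; ring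

-- total count bound: value * mn + rmin <= nums.length
theorem pvSumCounts (value : Int) (hv : 0 < value) (l : List Int)
    (hl : ∀ x ∈ l, 0 ≤ x ∧ x < value) (mn rmin : Int) (h0 : 0 ≤ mn) (hr0 : 0 ≤ rmin) (hrv : rmin < value)
    (hmn : ∀ s : Int, 0 ≤ s → s < value → mn ≤ (l.count s : Int))
    (hmn1 : ∀ s : Int, 0 ≤ s → s < rmin → mn + 1 ≤ (l.count s : Int)) :
    mn * value + rmin ≤ (l.length : Int) := by
  have hsum := pvSumLen value hv l hl
  have hle : ∑ r ∈ Finset.range value.toNat, (mn + if r < rmin.toNat then (1:Int) else 0)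
      ≤ ∑ r ∈ Finset.range value.toNat, ((l.count ((r : Nat) : Int)) : Int) := by
    apply Finset.sum_le_sum
    intro r hr
    simp only [Finset.mem_range] at hr
    by_cases hc : r < rmin.toNat
    · rw [if_pos hc]
      have := hmn1 ((r : Nat) : Int) (by omega) (by omega)
      omega
    · rw [if_neg hc]
      have := hmn ((r : Nat) : Int) (by omega) (by omega)
      omega
  rw [Finset.sum_add_distrib, pvSumInd _ _ (by omega), Finset.sum_const, Finset.card_range] at hle
  rw [hsum] at hle
  have hcast : ((value.toNat : Nat) : Int) = value := by omega
  have hfin : (value.toNat : Int) * mn + (rmin.toNat : Int) ≤ (l.length : Int) := by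
    simpa [nsmul_eq_mul] using hle
  rw [hcast] at hfin
  have h2 : ((rmin.toNat : Nat) : Int) = rmin := by omega
  rw [h2] at hfin
  linarith

-- ===== VERDICT (by name: the statement is the Claim_ definition above) =====
-- the assembled equivalence for one input
theorem pvMain (nums : List Int) (value : Int) (hv : 0 < value) :
    findSmallestInteger nums value = findSmallestInteger_alt nums value := by
  have hA := pvCountA nums value hv
  have hB := pvCountB nums value hv
  have hb1 : (0 : Int) < min value ((nums.length : Int) + 1) := lt_min hv (by positivity)
  have hbv : min value ((nums.length : Int) + 1) ≤ value := min_le_left _ _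
  have hrange : PySem.List.pyRange 0 (min value ((nums.length : Int) + 1))
      = (0 : Int) :: PySem.List.pyRange 1 (min value ((nums.length : Int) + 1)) :=
    PySem.List.pyRange_one_cons hb1
  unfold findSmallestInteger findSmallestInteger_alt
  simp only [hB, hrange, List.map_cons]
  obtain ⟨hmem, hle⟩ := pvFoldMin_spec
    ((PySem.List.pyRange 1 (min value ((nums.length : Int) + 1))).map
      (fun r => (((nums.map (fun i => i % value)).count r : Int), r)))
    (((nums.map (fun i => i % value)).count (0 : Int) : Int), (0 : Int))
  rw [show (((nums.map (fun i => i % value)).count (0 : Int) : Int), (0 : Int)) ::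
        List.map (fun r : Int => (((nums.map (fun i => i % value)).count r : Int), r))
          (PySem.List.pyRange 1 (min value ((nums.length : Int) + 1)))
      = List.map (fun r : Int => (((nums.map (fun i => i % value)).count r : Int), r))
          (PySem.List.pyRange 0 (min value ((nums.length : Int) + 1)))
      from by rw [hrange, List.map_cons]] at hmem hle
  obtain ⟨rmin, hrmem, hmeq⟩ := List.mem_map.mp hmem
  rw [PySem.List.mem_pyRange_one] at hrmem
  obtain ⟨hr0, hrb⟩ := hrmem
  have hrv : rmin < value := by omega
  rw [← hmeq]
  dsimp only
  have hmemcnt : ∀ x ∈ nums.map (fun i => i % value), 0 ≤ x ∧ x < value := by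
    intro x hx
    obtain ⟨i, _, rfl⟩ := List.mem_map.mp hx
    exact ⟨Int.emod_nonneg i (by omega), Int.emod_lt_of_pos i hv⟩
  have hlex : ∀ s : Int, 0 ≤ s → s < value →
      pvLexLe (((nums.map (fun i => i % value)).count rmin : Int), rmin)
        (((nums.map (fun i => i % value)).count s : Int), s) := by
    intro s h1 h2
    by_cases hs : s < min value ((nums.length : Int) + 1)
    · rw [hmeq]
      exact hle _ (List.mem_map.mpr ⟨s, PySem.List.mem_pyRange_one.mpr ⟨h1, hs⟩, rfl⟩)
    · push_neg at hs
      -- the scanned prefix is nums.length + 1 long, so some remainder there has count 0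
      have hex : ∃ r0 : Int, 0 ≤ r0 ∧ r0 < min value ((nums.length : Int) + 1) ∧
          (((nums.map (fun i => i % value)).count r0 : Int)) = 0 := by
        by_contra hcon
        push_neg at hcon
        have hone : ∀ r ∈ Finset.range (min value ((nums.length : Int) + 1)).toNat,
            (1 : Int) ≤ (((nums.map (fun i => i % value)).count ((r : Nat) : Int) : Int)) := by
          intro r hr
          simp only [Finset.mem_range] at hr
          have h := hcon ((r : Nat) : Int) (by omega) (by omega)
          have hnn := Int.natCast_nonneg ((nums.map (fun i => i % value)).count ((r : Nat) : Int))
          omega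
        have htot := pvSumLen value hv (nums.map (fun i => i % value)) hmemcnt
        rw [List.length_map] at htot
        have hsumle : ∑ r ∈ Finset.range (min value ((nums.length : Int) + 1)).toNat,
            (((nums.map (fun i => i % value)).count ((r : Nat) : Int) : Int))
            ≤ (nums.length : Int) := by
          calc ∑ r ∈ Finset.range (min value ((nums.length : Int) + 1)).toNat,
                (((nums.map (fun i => i % value)).count ((r : Nat) : Int) : Int))
              ≤ ∑ r ∈ Finset.range value.toNat,
                (((nums.map (fun i => i % value)).count ((r : Nat) : Int) : Int)) := by
                apply Finset.sum_le_sum_of_subset_of_nonneg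
                · intro a ha
                  simp only [Finset.mem_range] at *
                  omega
                · intro i _ _
                  exact Int.natCast_nonneg _
            _ = (nums.length : Int) := htot
        have hsumge : (((min value ((nums.length : Int) + 1)).toNat : Nat) : Int)
            ≤ ∑ r ∈ Finset.range (min value ((nums.length : Int) + 1)).toNat,
              (((nums.map (fun i => i % value)).count ((r : Nat) : Int) : Int)) := by
          calc (((min value ((nums.length : Int) + 1)).toNat : Nat) : Int)
              = ∑ _r ∈ Finset.range (min value ((nums.length : Int) + 1)).toNat, (1 : Int) := by
                simp
            _ ≤ _ := Finset.sum_le_sum hone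
        omega
      obtain ⟨r0, h00, h01, h02⟩ := hex
      have h03 := hle _ (List.mem_map.mpr ⟨r0, PySem.List.mem_pyRange_one.mpr ⟨h00, h01⟩, rfl⟩)
      rw [← hmeq] at h03
      have hnn1 := Int.natCast_nonneg ((nums.map (fun i => i % value)).count rmin)
      have hnn2 := Int.natCast_nonneg ((nums.map (fun i => i % value)).count s)
      unfold pvLexLe at h03 ⊢
      simp only at h03 ⊢
      omega
  -- abbreviations
  have hc0 : (0 : Int) ≤ ((nums.map (fun i => i % value)).count rmin : Int) := Int.natCast_nonneg _
  have hbound : ((nums.map (fun i => i % value)).count rmin : Int) * value + rmin ≤ (nums.length : Int) := by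
    have := pvSumCounts value hv (nums.map (fun i => i % value))
      (by
        intro x hx
        obtain ⟨i, _, rfl⟩ := List.mem_map.mp hx
        exact ⟨Int.emod_nonneg i (by omega), Int.emod_lt_of_pos i hv⟩)
      ((nums.map (fun i => i % value)).count rmin : Int) rmin hc0 hr0 hrv
      (by
        intro s h1 h2
        have := hlex s h1 h2
        unfold pvLexLe at this
        simp only at this
        omega)
      (by
        intro s h1 h2
        have := hlex s h1 (by omega)
        unfold pvLexLe at this
        simp only at this
        omega)
    simpa using this
  apply pvLoopA_eq value hv
  · positivity
  · have : (0 : Int) ≤ ((nums.map (fun i => i % value)).count rmin : Int) * value + rmin := by positivity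
    omega
  · -- every u before the answer still finds a positive (remaining) count
    intro u hu0 hut
    rw [pvCountA nums value hv]
    have hs0 : (0 : Int) ≤ u % value := Int.emod_nonneg u (by omega)
    have hsv : u % value < value := Int.emod_lt_of_pos u hv
    have hform : ((pvN value 0 u (u % value) : Nat) : Int) = u / value := by
      have h := pvN_formula value hv u.toNat (u % value) hs0 hsv
      rw [show ((u.toNat : Nat) : Int) = u from by omega] at h
      rw [h, if_neg (lt_irrefl _), add_zero]
    rw [hform]
    have hdm := Int.ediv_add_emod u value
    have hq1 : u / value < ((nums.map (fun i => i % value)).count rmin : Int) + 1 := by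
      apply lt_of_mul_lt_mul_right _ (le_of_lt hv)
      nlinarith [hdm, hs0, hsv, hut, hrv]
    have := hlex (u % value) hs0 hsv
    unfold pvLexLe at this
    simp only at this
    rcases this with h | ⟨heq, hrle⟩
    · omega
    · by_contra hcon
      push_neg at hcon
      have : u / value = ((nums.map (fun i => i % value)).count rmin : Int) := by omega
      nlinarith [hdm]
  · -- at the answer itself the count has been used up exactly
    have hrep : ((nums.map (fun i => i % value)).count rmin : Int) * value + rmin
        = rmin + value * ((nums.map (fun i => i % value)).count rmin : Int) := by ring
    have hmodt : (((nums.map (fun i => i % value)).count rmin : Int) * value + rmin) % value = rmin := by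
      rw [hrep, Int.add_mul_emod_self_left, Int.emod_eq_of_lt hr0 hrv]
    have hdivt : (((nums.map (fun i => i % value)).count rmin : Int) * value + rmin) / value
        = ((nums.map (fun i => i % value)).count rmin : Int) := by
      rw [hrep, Int.add_mul_ediv_left _ _ (by omega : value ≠ 0),
        Int.ediv_eq_zero_of_lt hr0 hrv, zero_add]
    rw [pvCountA nums value hv, hmodt]
    have ht0 : (0 : Int) ≤ ((nums.map (fun i => i % value)).count rmin : Int) * value + rmin := by positivity
    have hform : ((pvN value 0 (((nums.map (fun i => i % value)).count rmin : Int) * value + rmin) rmin : Nat) : Int)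
        = ((nums.map (fun i => i % value)).count rmin : Int) := by
      have h := pvN_formula value hv ((((nums.map (fun i => i % value)).count rmin : Int) * value + rmin)).toNat rmin hr0 hrv
      rw [show ((((((nums.map (fun i => i % value)).count rmin : Int) * value + rmin)).toNat : Nat) : Int)
          = (((nums.map (fun i => i % value)).count rmin : Int) * value + rmin) from by omega] at h
      rw [h, hmodt, if_neg (lt_irrefl _), add_zero, hdivt]
    rw [hform]

theorem findSmallestInteger_spec : Claim_equal_findSmallestInteger := by
  unfold Claim_equal_findSmallestInteger
  intro nums value _ hpre
  unfold Spec_findSmallestInteger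
  exact pvMain nums value hpre
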